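-- pv_equiv track=rewrite | github.com/jiazhi412/strong_attribute_bias | dataloader/CelebA_train.py | split_by_attr
-- ===== SOURCE A (Python) =====
-- def split_by_attr(labels, labels_d):
--     pp, pn, npl, nn = [], [], [], []
--     for k, (i, j) in enumerate(zip(labels, labels_d)):
--         if i == 1 and j == 1:
--             pp.append(k)
--         elif i == 1 and j == -1:
--             pn.append(k)
--         elif i == -1 and j == 1:
--             npl.append(k)
--         elif i == -1 and j == -1:
--             nn.append(k)
--     return pp, pn, npl, nn
-- ===== SOURCE B (Python) =====
-- def split_by_attr(labels, labels_d):
--     pairs = list(enumerate(zip(labels, labels_d)))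
--     pp = [k for k, (i, j) in pairs if i == 1 and j == 1]
--     pn = [k for k, (i, j) in pairs if i == 1 and j == -1]
--     npl = [k for k, (i, j) in pairs if i == -1 and j == 1]
--     nn = [k for k, (i, j) in pairs if i == -1 and j == -1]
--     return pp, pn, npl, nn
-- ===== Notes on version B (the rewrite author's own statement) =====
-- stated objective: simpler
-- what changed: Replaced the single stateful if/elif loop over four accumulators with four independent filter comprehensions over the enumerated zip, one full pass per group.
import Mathlib
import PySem

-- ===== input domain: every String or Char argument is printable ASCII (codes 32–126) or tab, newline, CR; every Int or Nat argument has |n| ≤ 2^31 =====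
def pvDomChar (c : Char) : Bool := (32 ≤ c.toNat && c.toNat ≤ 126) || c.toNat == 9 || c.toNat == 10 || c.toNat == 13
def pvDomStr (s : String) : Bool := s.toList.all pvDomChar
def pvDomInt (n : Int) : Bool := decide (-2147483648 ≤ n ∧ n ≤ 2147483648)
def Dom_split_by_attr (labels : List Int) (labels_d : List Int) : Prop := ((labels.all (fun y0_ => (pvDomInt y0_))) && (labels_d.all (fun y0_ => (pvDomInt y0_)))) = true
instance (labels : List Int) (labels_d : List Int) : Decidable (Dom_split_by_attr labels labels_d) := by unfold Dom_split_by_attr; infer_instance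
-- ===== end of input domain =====

-- B replaces A's single stateful if/elif loop by four independent filter passes over the enumerated zip (objective: simpler).

-- ===== PORT A =====
-- one pass, four accumulators, appends at the back (literal transliteration of A's loop)
def split_by_attr (labels : List Int) (labels_d : List Int) : List Int × List Int × List Int × List Int :=
  (PySem.List.enumerate (labels.zip labels_d)).foldl
    (fun acc kij =>
      let (pp, pn, npl, nn) := acc
      let (k, i, j) := kij
      if i = 1 ∧ j = 1 then (pp ++ [k], pn, npl, nn)
      else if i = 1 ∧ j = -1 then (pp, pn ++ [k], npl, nn)
      else if i = -1 ∧ j = 1 then (pp, pn, npl ++ [k], nn)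
      else if i = -1 ∧ j = -1 then (pp, pn, npl, nn ++ [k])
      else acc)
    ([], [], [], [])

-- ===== PORT B =====
-- four independent filter comprehensions over the same enumerated zip
def split_by_attr_alt (labels : List Int) (labels_d : List Int) : List Int × List Int × List Int × List Int :=
  let pairs : List (Int × Int × Int) := PySem.List.enumerate (labels.zip labels_d)
  ((pairs.filter (fun p => p.2.1 == 1 && p.2.2 == 1)).map (·.1),
   (pairs.filter (fun p => p.2.1 == 1 && p.2.2 == -1)).map (·.1),
   (pairs.filter (fun p => p.2.1 == -1 && p.2.2 == 1)).map (·.1),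
   (pairs.filter (fun p => p.2.1 == -1 && p.2.2 == -1)).map (·.1))

-- ===== PRECONDITION & SPEC =====
def Spec_split_by_attr (labels : List Int) (labels_d : List Int) (out : List Int × List Int × List Int × List Int) : Prop := out = split_by_attr_alt labels labels_d
instance (labels : List Int) (labels_d : List Int) (out : List Int × List Int × List Int × List Int) : Decidable (Spec_split_by_attr labels labels_d out) := by unfold Spec_split_by_attr; infer_instance

-- ===== CLAIM (what is proved, stated in full; the proofs are below) =====
def Claim_equal_split_by_attr : Prop := ∀ (labels : List Int) (labels_d : List Int), Dom_split_by_attr labels labels_d → Spec_split_by_attr labels labels_d (split_by_attr labels labels_d)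

-- ===== LEMMAS AND PROOFS =====

-- the loop invariant: running A's fold from accumulators (pp,pn,npl,nn) appends exactly B's four filters of the remaining list
theorem split_fold_eq (l : List (Int × Int × Int)) (pp pn npl nn : List Int) :
    l.foldl
      (fun acc kij =>
        let (pp, pn, npl, nn) := acc
        let (k, i, j) := kij
        if i = 1 ∧ j = 1 then (pp ++ [k], pn, npl, nn)
        else if i = 1 ∧ j = -1 then (pp, pn ++ [k], npl, nn)
        else if i = -1 ∧ j = 1 then (pp, pn, npl ++ [k], nn)
        else if i = -1 ∧ j = -1 then (pp, pn, npl, nn ++ [k])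
        else acc)
      (pp, pn, npl, nn)
    = (pp ++ (l.filter (fun p => p.2.1 == 1 && p.2.2 == 1)).map (·.1),
       pn ++ (l.filter (fun p => p.2.1 == 1 && p.2.2 == -1)).map (·.1),
       npl ++ (l.filter (fun p => p.2.1 == -1 && p.2.2 == 1)).map (·.1),
       nn ++ (l.filter (fun p => p.2.1 == -1 && p.2.2 == -1)).map (·.1)) := by
  induction l generalizing pp pn npl nn with
  | nil => simp
  | cons h t ih =>
    obtain ⟨k, i, j⟩ := h
    simp only [List.foldl_cons, List.filter_cons]
    by_cases h1 : i = 1 ∧ j = 1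
    · obtain ⟨rfl, rfl⟩ := h1; simp [ih]
    · by_cases h2 : i = 1 ∧ j = -1
      · obtain ⟨rfl, rfl⟩ := h2; simp [ih]
      · by_cases h3 : i = -1 ∧ j = 1
        · obtain ⟨rfl, rfl⟩ := h3; simp [ih]
        · by_cases h4 : i = -1 ∧ j = -1
          · obtain ⟨rfl, rfl⟩ := h4; simp [ih]
          · have e1 : (i == 1 && j == 1) = false := by
              simp only [Bool.and_eq_false_iff, beq_eq_false_iff_ne]; tauto
            have e2 : (i == 1 && j == -1) = false := by
              simp only [Bool.and_eq_false_iff, beq_eq_false_iff_ne]; tauto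
            have e3 : (i == -1 && j == 1) = false := by
              simp only [Bool.and_eq_false_iff, beq_eq_false_iff_ne]; tauto
            have e4 : (i == -1 && j == -1) = false := by
              simp only [Bool.and_eq_false_iff, beq_eq_false_iff_ne]; tauto
            simp only [if_neg h1, if_neg h2, if_neg h3, if_neg h4, e1, e2, e3, e4]
            simpa using ih pp pn npl nn

-- ===== VERDICT (by name: the statement is the Claim_ definition above) =====
theorem split_by_attr_spec : Claim_equal_split_by_attr := by
  intro labels labels_d _
  unfold Spec_split_by_attr split_by_attr split_by_attr_alt
  simpa using split_fold_eq (PySem.List.enumerate (labels.zip labels_d)) [] [] [] []
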